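-- pv_equiv track=rewrite | github.com/sp9028/P1 | Rešitve starih izpitov/14.8. (Marsovci).py | sumljivi
-- ===== SOURCE A (Python) =====
-- from collections import defaultdict
--
-- def vsebovanost(krogi):
--     vsebuje = defaultdict(list)
--     notranji = set()
--
--     for krog0 in krogi:
--         for krog1 in krogi:
--             x0, y0, r0 = krog0
--             x1, y1, r1 = krog1
--             if r0 > r1 and (x1 - x0) ** 2 + (y1 - y0) ** 2 < r0 ** 2:
--                 vsebuje[krog0].append(krog1)
--                 notranji.add(krog1)
--
--     return vsebuje, notranji
--
-- def sumljivi(krogi):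
--     _sumljivi = set()
--     vsebuje,notranji = vsebovanost(krogi)
--     for krog in krogi:
--         if krog not in notranji:
--             if vsebuje[krog]:
--                 for vkrog in vsebuje[krog]:
--                     if vkrog in vsebuje:
--                         _sumljivi.add(krog[:2])
--             else:
--                 _sumljivi.add(krog[:2])
--     return _sumljivi
-- ===== SOURCE B (Python) =====
-- def sumljivi(krogi):
--     h, contained = {}, set()
--     for c in sorted(krogi, key=lambda k: k[2]):
--         hh = 0
--         for d in h:
--             if c[2] > d[2] and (d[0] - c[0]) ** 2 + (d[1] - c[1]) ** 2 < c[2] ** 2: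
--                 hh = max(hh, min(h[d], 1) + 1)
--                 contained.add(d)
--         h[c] = hh
--     return {c[:2] for c in krogi if c not in contained and h[c] != 1}
-- ===== Notes on version B (the rewrite author's own statement) =====
-- stated objective: alternative
-- what changed: B sorts the circles by radius and makes one triangular pass over sorted prefixes, computing each circle's nesting height capped at 2 as a dynamic program (h=0 none contained, 2 some contained circle itself contains one) while marking contained circles, then selects circles that are not contained and have h != 1; A instead builds a defaultdict of adjacency lists over all ordered pairs and re-scans each circle's list.
import Mathlib
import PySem

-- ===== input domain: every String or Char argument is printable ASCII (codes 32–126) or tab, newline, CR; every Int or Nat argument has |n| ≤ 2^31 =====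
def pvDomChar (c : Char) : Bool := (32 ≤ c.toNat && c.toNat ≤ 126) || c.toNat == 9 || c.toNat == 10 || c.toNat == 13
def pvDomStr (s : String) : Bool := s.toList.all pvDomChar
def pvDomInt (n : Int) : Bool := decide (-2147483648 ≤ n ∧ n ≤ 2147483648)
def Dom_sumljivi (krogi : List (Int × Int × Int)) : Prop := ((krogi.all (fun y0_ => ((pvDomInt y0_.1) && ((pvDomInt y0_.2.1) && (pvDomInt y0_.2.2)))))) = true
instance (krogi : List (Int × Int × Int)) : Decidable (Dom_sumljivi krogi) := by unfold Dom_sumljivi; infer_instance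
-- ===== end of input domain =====

-- B replaces A's all-pairs adjacency-list construction and two-phase selection by a single
-- radius-sorted triangular pass that computes each circle's nesting height capped at 2 (a DP over
-- the sorted prefix) and marks contained circles on the way; objective: alternative decomposition.

-- ===== PORT A =====
-- helper: Python's vsebovanost(krogi) — defaultdict circle ↦ list of circles it contains, plus the set of contained circles
def vsebovanost (krogi : List (Int × Int × Int)) :
    PySem.Dict (Int × Int × Int) (List (Int × Int × Int)) × PySem.Set (Int × Int × Int) :=
  krogi.foldl (fun st krog0 =>
    krogi.foldl (fun st krog1 =>
      if krog0.2.2 > krog1.2.2 ∧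
          (krog1.1 - krog0.1) ^ 2 + (krog1.2.1 - krog0.2.1) ^ 2 < krog0.2.2 ^ 2 then
        -- vsebuje[krog0].append(krog1); notranji.add(krog1)
        (st.1.modify krog0 [] (· ++ [krog1]), st.2.add krog1)
      else st) st)
    (PySem.Dict.empty, PySem.Set.empty)

def sumljivi (krogi : List (Int × Int × Int)) : List (Int × Int) :=
  let vn := vsebovanost krogi
  let notranji := vn.2
  -- state: (_sumljivi, vsebuje) — the defaultdict read 'vsebuje[krog]' inserts [] for a missing key
  (krogi.foldl
    (fun (st : PySem.Set (Int × Int) × PySem.Dict (Int × Int × Int) (List (Int × Int × Int))) krog =>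
      if notranji.contains krog then st
      else
        let lst := st.2.getD krog []
        let vs := if st.2.contains krog then st.2 else st.2.insert krog []
        if lst ≠ [] then
          (lst.foldl (fun s vkrog =>
            if vs.contains vkrog then s.add (krog.1, krog.2.1) else s) st.1, vs)
        else (st.1.add (krog.1, krog.2.1), vs))
    (PySem.Set.empty, vn.1)).1

-- ===== PORT B =====
-- the body of B's outer loop: for one circle c, scan the keys of h (the already-processed,
-- strictly smaller-radius circles), building hh = capped height of c and marking contained circles
def pvStep (st : PySem.Dict (Int × Int × Int) Int × PySem.Set (Int × Int × Int))
    (c : Int × Int × Int) :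
    PySem.Dict (Int × Int × Int) Int × PySem.Set (Int × Int × Int) :=
  let p := st.1.keys.foldl
    (fun (q : Int × PySem.Set (Int × Int × Int)) d =>
      if c.2.2 > d.2.2 ∧ (d.1 - c.1) ^ 2 + (d.2.1 - c.2.1) ^ 2 < c.2.2 ^ 2 then
        (max q.1 (min (st.1.getD d 0) 1 + 1), q.2.add d)
      else q) (0, st.2)
  (st.1.insert c p.1, p.2)

def sumljivi_alt (krogi : List (Int × Int × Int)) : List (Int × Int) :=
  let st := (PySem.List.sorted krogi (fun k => k.2.2)).foldl pvStep
    (PySem.Dict.empty, PySem.Set.empty)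
  -- 'h[d]' / 'h[c]' are exact as getD: every looked-up key is in h (d ranges over h's keys;
  -- every c ∈ krogi was processed by the loop)
  PySem.Set.ofList ((krogi.filter (fun c =>
      !st.2.contains c && decide (st.1.getD c 0 ≠ 1))).map (fun c => (c.1, c.2.1)))

-- ===== PRECONDITION & SPEC =====
def Spec_sumljivi (krogi : List (Int × Int × Int)) (out : List (Int × Int)) : Prop := out = sumljivi_alt krogi
instance (krogi : List (Int × Int × Int)) (out : List (Int × Int)) : Decidable (Spec_sumljivi krogi out) := by unfold Spec_sumljivi; infer_instance

-- ===== CLAIM (what is proved, stated in full; the proofs are below) =====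
def Claim_equal_sumljivi : Prop := ∀ (krogi : List (Int × Int × Int)), Dom_sumljivi krogi → Spec_sumljivi krogi (sumljivi krogi)

-- ===== LEMMAS AND PROOFS =====

-- the containment predicate both programs test (abbrev so Decidable is inferred by unfolding)
abbrev pvCont (c d : Int × Int × Int) : Prop :=
  c.2.2 > d.2.2 ∧ (d.1 - c.1) ^ 2 + (d.2.1 - c.2.1) ^ 2 < c.2.2 ^ 2

-- vsebovanost with the outer loop cut at an arbitrary prefix l (for induction)
def pvOuter (krogi l : List (Int × Int × Int))
    (st : PySem.Dict (Int × Int × Int) (List (Int × Int × Int)) × PySem.Set (Int × Int × Int)) :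
    PySem.Dict (Int × Int × Int) (List (Int × Int × Int)) × PySem.Set (Int × Int × Int) :=
  l.foldl (fun st krog0 =>
    krogi.foldl (fun st krog1 =>
      if krog0.2.2 > krog1.2.2 ∧
          (krog1.1 - krog0.1) ^ 2 + (krog1.2.1 - krog0.2.1) ^ 2 < krog0.2.2 ^ 2 then
        (st.1.modify krog0 [] (· ++ [krog1]), st.2.add krog1)
      else st) st) st

theorem pv_inner_dict (krogi : List (Int × Int × Int))
    (k0 : Int × Int × Int)
    (st : PySem.Dict (Int × Int × Int) (List (Int × Int × Int)) × PySem.Set (Int × Int × Int))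
    (c : Int × Int × Int) :
    (krogi.foldl (fun st krog1 =>
      if k0.2.2 > krog1.2.2 ∧
          (krog1.1 - k0.1) ^ 2 + (krog1.2.1 - k0.2.1) ^ 2 < k0.2.2 ^ 2 then
        (st.1.modify k0 [] (· ++ [krog1]), st.2.add krog1)
      else st) st).1.getD c [] =
      if c = k0 then st.1.getD c [] ++ krogi.filter (fun d => decide (pvCont k0 d))
      else st.1.getD c [] := by
  induction krogi generalizing st with
  | nil => simp
  | cons d l ih =>
    simp only [List.foldl_cons]
    rw [ih]
    by_cases h : pvCont k0 d
    · have h' : (k0.2.2 > d.2.2 ∧ (d.1 - k0.1) ^ 2 + (d.2.1 - k0.2.1) ^ 2 < k0.2.2 ^ 2) := h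
      rw [if_pos h']
      simp only [PySem.Dict.getD_modify]
      split <;> simp_all
    · have h' : ¬ (k0.2.2 > d.2.2 ∧ (d.1 - k0.1) ^ 2 + (d.2.1 - k0.2.1) ^ 2 < k0.2.2 ^ 2) := h
      rw [if_neg h']
      split <;> simp_all

theorem pv_inner_contains (krogi : List (Int × Int × Int))
    (k0 : Int × Int × Int)
    (st : PySem.Dict (Int × Int × Int) (List (Int × Int × Int)) × PySem.Set (Int × Int × Int))
    (c : Int × Int × Int) :
    ((krogi.foldl (fun st krog1 =>
      if k0.2.2 > krog1.2.2 ∧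
          (krog1.1 - k0.1) ^ 2 + (krog1.2.1 - k0.2.1) ^ 2 < k0.2.2 ^ 2 then
        (st.1.modify k0 [] (· ++ [krog1]), st.2.add krog1)
      else st) st).1.contains c = true ↔
      st.1.contains c = true ∨ (c = k0 ∧ ∃ d ∈ krogi, pvCont k0 d)) := by
  induction krogi generalizing st with
  | nil => simp
  | cons d l ih =>
    simp only [List.foldl_cons]
    rw [ih]
    by_cases h : pvCont k0 d
    · have h' : (k0.2.2 > d.2.2 ∧ (d.1 - k0.1) ^ 2 + (d.2.1 - k0.2.1) ^ 2 < k0.2.2 ^ 2) := h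
      rw [if_pos h']
      simp only [PySem.Dict.contains_modify]
      constructor
      · rintro (hh | hh)
        · simp only [Bool.or_eq_true, beq_iff_eq] at hh
          rcases hh with hck | hst
          · exact Or.inr ⟨hck, d, by simp, h⟩
          · exact Or.inl hst
        · exact Or.inr ⟨hh.1, hh.2.choose, by simp [hh.2.choose_spec.1], hh.2.choose_spec.2⟩
      · rintro (hh | ⟨hck, e, he, hce⟩)
        · exact Or.inl (by simp [hh])
        · exact Or.inl (by simp [hck])
    · have h' : ¬ (k0.2.2 > d.2.2 ∧ (d.1 - k0.1) ^ 2 + (d.2.1 - k0.2.1) ^ 2 < k0.2.2 ^ 2) := h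
      rw [if_neg h']
      constructor
      · rintro (hh | ⟨hck, e, he, hce⟩)
        · exact Or.inl hh
        · exact Or.inr ⟨hck, e, by simp [he], hce⟩
      · rintro (hh | ⟨hck, e, he, hce⟩)
        · exact Or.inl hh
        · rcases List.mem_cons.mp he with rfl | he'
          · exact absurd hce h
          · exact Or.inr ⟨hck, e, he', hce⟩

theorem pv_inner_set (krogi : List (Int × Int × Int))
    (k0 : Int × Int × Int)
    (st : PySem.Dict (Int × Int × Int) (List (Int × Int × Int)) × PySem.Set (Int × Int × Int))
    (x : Int × Int × Int) :
    (x ∈ (krogi.foldl (fun st krog1 =>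
      if k0.2.2 > krog1.2.2 ∧
          (krog1.1 - k0.1) ^ 2 + (krog1.2.1 - k0.2.1) ^ 2 < k0.2.2 ^ 2 then
        (st.1.modify k0 [] (· ++ [krog1]), st.2.add krog1)
      else st) st).2 ↔
      x ∈ st.2 ∨ (x ∈ krogi ∧ pvCont k0 x)) := by
  induction krogi generalizing st with
  | nil => simp
  | cons d l ih =>
    simp only [List.foldl_cons]
    rw [ih]
    by_cases h : pvCont k0 d
    · have h' : (k0.2.2 > d.2.2 ∧ (d.1 - k0.1) ^ 2 + (d.2.1 - k0.2.1) ^ 2 < k0.2.2 ^ 2) := h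
      rw [if_pos h']
      simp only [PySem.Set.mem_add, List.mem_cons]
      constructor
      · rintro ((hx | rfl) | ⟨hl, hc⟩)
        · exact Or.inl hx
        · exact Or.inr ⟨Or.inl rfl, h⟩
        · exact Or.inr ⟨Or.inr hl, hc⟩
      · rintro (hx | ⟨rfl | hl, hc⟩)
        · exact Or.inl (Or.inl hx)
        · exact Or.inl (Or.inr rfl)
        · exact Or.inr ⟨hl, hc⟩
    · have h' : ¬ (k0.2.2 > d.2.2 ∧ (d.1 - k0.1) ^ 2 + (d.2.1 - k0.2.1) ^ 2 < k0.2.2 ^ 2) := h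
      rw [if_neg h']
      simp only [List.mem_cons]
      constructor
      · rintro (hx | ⟨hl, hc⟩)
        · exact Or.inl hx
        · exact Or.inr ⟨Or.inr hl, hc⟩
      · rintro (hx | ⟨rfl | hl, hc⟩)
        · exact Or.inl hx
        · exact absurd hc h
        · exact Or.inr ⟨hl, hc⟩

theorem pv_outer_getD_ne (krogi l : List (Int × Int × Int))
    (st : PySem.Dict (Int × Int × Int) (List (Int × Int × Int)) × PySem.Set (Int × Int × Int))
    (c : Int × Int × Int) :
    ((pvOuter krogi l st).1.getD c [] ≠ [] ↔
      st.1.getD c [] ≠ [] ∨ (c ∈ l ∧ ∃ d ∈ krogi, pvCont c d)) := by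
  induction l generalizing st with
  | nil => simp [pvOuter]
  | cons k0 t ih =>
    simp only [pvOuter, List.foldl_cons] at ih ⊢
    rw [ih]
    rw [pv_inner_dict]
    by_cases hck : c = k0
    · subst hck
      rw [if_pos rfl]
      constructor
      · rintro (hne | ⟨hc, hd⟩)
        · by_cases h0 : st.1.getD c [] = []
          · rw [h0, List.nil_append] at hne
            obtain ⟨d, hd⟩ := List.exists_mem_of_ne_nil _ hne
            rw [List.mem_filter] at hd
            exact Or.inr ⟨List.mem_cons_self, d, hd.1, by simpa using hd.2⟩
          · exact Or.inl h0
        · exact Or.inr ⟨List.mem_cons_of_mem _ hc, hd⟩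
      · rintro (hne | ⟨-, d, hd, hcd⟩)
        · exact Or.inl (fun h => hne (List.append_eq_nil_iff.mp h).1)
        · refine Or.inl (fun h => ?_)
          have hmem : d ∈ List.filter (fun d => decide (pvCont c d)) krogi :=
            List.mem_filter.mpr ⟨hd, by simpa using hcd⟩
          rw [(List.append_eq_nil_iff.mp h).2] at hmem
          simp at hmem
    · rw [if_neg hck]
      simp only [List.mem_cons]
      tauto

theorem pv_outer_getD (krogi l : List (Int × Int × Int))
    (st : PySem.Dict (Int × Int × Int) (List (Int × Int × Int)) × PySem.Set (Int × Int × Int))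
    (c e : Int × Int × Int) :
    (e ∈ (pvOuter krogi l st).1.getD c [] ↔
      e ∈ st.1.getD c [] ∨ (c ∈ l ∧ e ∈ krogi ∧ pvCont c e)) := by
  induction l generalizing st with
  | nil => simp [pvOuter]
  | cons k0 t ih =>
    simp only [pvOuter, List.foldl_cons] at ih ⊢
    rw [ih]
    rw [pv_inner_dict]
    by_cases hck : c = k0
    · subst hck
      rw [if_pos rfl]
      simp only [List.mem_append, List.mem_filter, List.mem_cons, decide_eq_true_eq]
      tauto
    · rw [if_neg hck]
      simp only [List.mem_cons]
      tauto

theorem pv_outer_contains (krogi l : List (Int × Int × Int))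
    (st : PySem.Dict (Int × Int × Int) (List (Int × Int × Int)) × PySem.Set (Int × Int × Int))
    (c : Int × Int × Int) :
    ((pvOuter krogi l st).1.contains c = true ↔
      st.1.contains c = true ∨ (c ∈ l ∧ ∃ d ∈ krogi, pvCont c d)) := by
  induction l generalizing st with
  | nil => simp [pvOuter]
  | cons k0 t ih =>
    simp only [pvOuter, List.foldl_cons] at ih ⊢
    rw [ih, pv_inner_contains]
    simp only [List.mem_cons]
    constructor
    · rintro ((hc | ⟨rfl, hd⟩) | ⟨hc, hd⟩)
      · exact Or.inl hc
      · exact Or.inr ⟨Or.inl rfl, hd⟩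
      · exact Or.inr ⟨Or.inr hc, hd⟩
    · rintro (hc | ⟨rfl | hc, hd⟩)
      · exact Or.inl (Or.inl hc)
      · exact Or.inl (Or.inr ⟨rfl, hd⟩)
      · exact Or.inr ⟨hc, hd⟩

theorem pv_outer_set (krogi l : List (Int × Int × Int))
    (st : PySem.Dict (Int × Int × Int) (List (Int × Int × Int)) × PySem.Set (Int × Int × Int))
    (x : Int × Int × Int) :
    (x ∈ (pvOuter krogi l st).2 ↔
      x ∈ st.2 ∨ (x ∈ krogi ∧ ∃ k0 ∈ l, pvCont k0 x)) := by
  induction l generalizing st with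
  | nil => simp [pvOuter]
  | cons k0 t ih =>
    simp only [pvOuter, List.foldl_cons] at ih ⊢
    rw [ih, pv_inner_set]
    simp only [List.mem_cons]
    constructor
    · rintro ((hx | ⟨hk, hc⟩) | ⟨hk, k1, hk1, hc⟩)
      · exact Or.inl hx
      · exact Or.inr ⟨hk, k0, Or.inl rfl, hc⟩
      · exact Or.inr ⟨hk, k1, Or.inr hk1, hc⟩
    · rintro (hx | ⟨hk, k1, rfl | hk1, hc⟩)
      · exact Or.inl (Or.inl hx)
      · exact Or.inl (Or.inr ⟨hk, hc⟩)
      · exact Or.inr ⟨hk, k1, hk1, hc⟩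

theorem pv_vseb_eq (krogi : List (Int × Int × Int)) :
    vsebovanost krogi = pvOuter krogi krogi (PySem.Dict.empty, PySem.Set.empty) := rfl

theorem pv_vseb_getD (krogi : List (Int × Int × Int)) (c e : Int × Int × Int) :
    (e ∈ (vsebovanost krogi).1.getD c [] ↔ c ∈ krogi ∧ e ∈ krogi ∧ pvCont c e) := by
  rw [pv_vseb_eq, pv_outer_getD]
  simp [PySem.Dict.getD_empty]

theorem pv_vseb_getD_ne (krogi : List (Int × Int × Int)) (c : Int × Int × Int) :
    ((vsebovanost krogi).1.getD c [] ≠ [] ↔ c ∈ krogi ∧ ∃ d ∈ krogi, pvCont c d) := by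
  rw [pv_vseb_eq, pv_outer_getD_ne]
  simp [PySem.Dict.getD_empty]

theorem pv_vseb_contains (krogi : List (Int × Int × Int)) (c : Int × Int × Int) :
    ((vsebovanost krogi).1.contains c = true ↔ c ∈ krogi ∧ ∃ d ∈ krogi, pvCont c d) := by
  rw [pv_vseb_eq, pv_outer_contains]
  simp [PySem.Dict.contains_empty]

theorem pv_notranji (krogi : List (Int × Int × Int)) (x : Int × Int × Int) :
    (x ∈ (vsebovanost krogi).2 ↔ x ∈ krogi ∧ ∃ d ∈ krogi, pvCont d x) := by
  rw [pv_vseb_eq, pv_outer_set]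
  simp [PySem.Set.empty]

theorem pv_foldl_add_mem {α : Type} (q : α → Bool)
    {β : Type} [BEq β] [LawfulBEq β] (l : List α) (s : PySem.Set β) (y : β) (hy : y ∈ s) :
    l.foldl (fun s x => if q x then PySem.Set.add s y else s) s = s := by
  induction l with
  | nil => rfl
  | cons a t ih =>
    simp only [List.foldl_cons]
    by_cases h : q a = true
    · rw [if_pos h]
      have : PySem.Set.add s y = s := by
        simp [PySem.Set.add, PySem.Set.contains, hy]
      rw [this, ih]
    · rw [if_neg h, ih]

theorem pv_foldl_add_const {α β : Type} [BEq β] [LawfulBEq β] (q : α → Bool) (l : List α)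
    (s : PySem.Set β) (y : β) :
    l.foldl (fun s x => if q x then PySem.Set.add s y else s) s =
      if l.any q then PySem.Set.add s y else s := by
  induction l with
  | nil => simp
  | cons a t ih =>
    simp only [List.foldl_cons, List.any_cons]
    by_cases h : q a = true
    · rw [if_pos h]
      rw [pv_foldl_add_mem q t (PySem.Set.add s y) y (by simp [PySem.Set.mem_add])]
      simp [h]
    · rw [if_neg h, ih]
      simp [h]

theorem pv_ofList_filter_map {α β : Type} [BEq β] (p : α → Bool) (f : α → β)
    (l : List α) (s : PySem.Set β) :
    ((l.filter p).map f).foldl PySem.Set.add s =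
      l.foldl (fun s c => if p c then PySem.Set.add s (f c) else s) s := by
  induction l generalizing s with
  | nil => rfl
  | cons a t ih =>
    by_cases h : p a = true
    · rw [List.filter_cons_of_pos h]
      simp only [List.map_cons, List.foldl_cons, if_pos h]
      exact ih _
    · rw [List.filter_cons_of_neg (by simp [h])]
      simp only [List.foldl_cons, if_neg h]
      exact ih _

-- the condition under which A's loop adds krog[:2], as a pure predicate of the input
def pvCondA (krogi : List (Int × Int × Int)) (c : Int × Int × Int) : Bool :=
  !(vsebovanost krogi).2.contains c &&
    (decide ((vsebovanost krogi).1.getD c [] = []) ||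
      ((vsebovanost krogi).1.getD c []).any (fun e => (vsebovanost krogi).1.contains e))

theorem pv_loop_proj (krogi : List (Int × Int × Int)) (l : List (Int × Int × Int))
    (s : PySem.Set (Int × Int))
    (vs : PySem.Dict (Int × Int × Int) (List (Int × Int × Int)))
    (hgetD : ∀ c, vs.getD c [] = (vsebovanost krogi).1.getD c [])
    (hcont : ∀ c, c ∈ (vsebovanost krogi).2 → vs.contains c = (vsebovanost krogi).1.contains c) :
    (l.foldl
      (fun (st : PySem.Set (Int × Int) × PySem.Dict (Int × Int × Int) (List (Int × Int × Int))) krog =>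
        if (vsebovanost krogi).2.contains krog then st
        else
          let lst := st.2.getD krog []
          let vs := if st.2.contains krog then st.2 else st.2.insert krog []
          if lst ≠ [] then
            (lst.foldl (fun s vkrog =>
              if vs.contains vkrog then s.add (krog.1, krog.2.1) else s) st.1, vs)
          else (st.1.add (krog.1, krog.2.1), vs))
      (s, vs)).1 =
      l.foldl (fun s c => if pvCondA krogi c then PySem.Set.add s (c.1, c.2.1) else s) s := by
  induction l generalizing s vs with
  | nil => rfl
  | cons c t ih =>
    simp only [List.foldl_cons]
    by_cases hnc : (vsebovanost krogi).2.contains c = true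
    · rw [if_pos hnc]
      have hca : pvCondA krogi c = false := by
        simp only [pvCondA, hnc, Bool.not_true, Bool.false_and]
      rw [hca]
      simp only [Bool.false_eq_true, if_false]
      exact ih s vs hgetD hcont
    · rw [if_neg hnc]
      set vs' := if vs.contains c = true then vs else vs.insert c [] with hvs'
      have hgetD' : ∀ c', vs'.getD c' [] = (vsebovanost krogi).1.getD c' [] := by
        intro c'
        rw [hvs']
        split
        · exact hgetD c'
        · next hvc =>
          rw [PySem.Dict.getD_insert]
          split
          · next he =>
            subst he
            rw [← hgetD c', PySem.Dict.getD_of_not_contains _ _ (by simpa using hvc)]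
          · exact hgetD c'
      have hcont' : ∀ c', c' ∈ (vsebovanost krogi).2 →
          vs'.contains c' = (vsebovanost krogi).1.contains c' := by
        intro c' hc'
        rw [hvs']
        split
        · exact hcont c' hc'
        · rw [PySem.Dict.contains_insert]
          have hne : (c' == c) = false := by
            simp only [beq_eq_false_iff_ne, ne_eq]
            intro he
            subst he
            exact hnc ((PySem.Set.contains_iff _ _).mpr hc')
          rw [hne, Bool.false_or]
          exact hcont c' hc'
      have hnc' : c ∉ (vsebovanost krogi).2 := fun h => hnc ((PySem.Set.contains_iff _ _).mpr h)
      by_cases hl : vs.getD c [] = []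
      · rw [if_neg (by simpa using hl)]
        have hca : pvCondA krogi c = true := by
          simp only [pvCondA]
          rw [← hgetD c, hl]
          simp [hnc']
        rw [hca, if_pos rfl]
        exact ih _ _ hgetD' hcont'
      · rw [if_pos (by simpa using hl)]
        have hcg : ∀ vk ∈ vs.getD c [], vs'.contains vk = (vsebovanost krogi).1.contains vk := by
          intro vk hvk
          rw [hgetD c] at hvk
          have := (pv_vseb_getD krogi c vk).mp hvk
          exact hcont' vk ((pv_notranji krogi vk).mpr ⟨this.2.1, c, this.1, this.2.2⟩)
        have hrw : (vs.getD c []).foldl (fun s vkrog =>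
              if vs'.contains vkrog then s.add (c.1, c.2.1) else s) s =
            (vs.getD c []).foldl (fun s vkrog =>
              if (vsebovanost krogi).1.contains vkrog then PySem.Set.add s (c.1, c.2.1) else s) s :=
          PySem.List.foldl_congr_mem _ _ _ _ (fun acc x hx => by rw [hcg x hx])
        rw [ih _ _ hgetD' hcont', hrw,
          pv_foldl_add_const (fun e => (vsebovanost krogi).1.contains e)]
        have hca : pvCondA krogi c =
            ((vs.getD c []).any fun e => (vsebovanost krogi).1.contains e) := by
          simp only [pvCondA]
          rw [← hgetD c]
          simp [hnc', hl]
        rw [hca]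

-- ===== B-side lemmas =====

-- does c contain anything in krogi?
def pvHas (krogi : List (Int × Int × Int)) (c : Int × Int × Int) : Bool :=
  krogi.any (fun d => decide (pvCont c d))

-- nesting height of c capped at 2: 0 = contains nothing, 2 = contains a circle that itself
-- contains something, 1 = contains something but only childless circles
def pvH (krogi : List (Int × Int × Int)) (c : Int × Int × Int) : Int :=
  if pvHas krogi c then
    (if krogi.any (fun d => decide (pvCont c d) && pvHas krogi d) then 2 else 1) else 0

theorem pvH_nonneg (kr : List (Int × Int × Int)) (d : Int × Int × Int) :
    0 ≤ pvH kr d ∧ pvH kr d ≤ 2 := by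
  unfold pvH; split_ifs <;> omega

theorem pvH_pos_iff (kr : List (Int × Int × Int)) (d : Int × Int × Int) :
    1 ≤ pvH kr d ↔ pvHas kr d = true := by
  unfold pvH; split_ifs <;> simp_all

theorem pv_maxfold_ge (kr : List (Int × Int × Int)) (c : Int × Int × Int)
    (L : List (Int × Int × Int)) (a : Int) :
    a ≤ L.foldl (fun a d => if pvCont c d then max a (min (pvH kr d) 1 + 1) else a) a ∧
    ∀ d ∈ L, pvCont c d →
      min (pvH kr d) 1 + 1 ≤
        L.foldl (fun a d => if pvCont c d then max a (min (pvH kr d) 1 + 1) else a) a := by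
  induction L generalizing a with
  | nil => simp
  | cons d t ih =>
    simp only [List.foldl_cons]
    by_cases h : pvCont c d
    · rw [if_pos h]
      refine ⟨le_trans (le_max_left _ _) (ih _).1, ?_⟩
      intro e he hc
      rcases List.mem_cons.mp he with rfl | he'
      · exact le_trans (le_max_right _ _) (ih _).1
      · exact (ih _).2 e he' hc
    · rw [if_neg h]
      refine ⟨(ih a).1, ?_⟩
      intro e he hc
      rcases List.mem_cons.mp he with rfl | he'
      · exact absurd hc h
      · exact (ih a).2 e he' hc

theorem pv_maxfold_cases (kr : List (Int × Int × Int)) (c : Int × Int × Int)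
    (L : List (Int × Int × Int)) (a : Int) :
    L.foldl (fun a d => if pvCont c d then max a (min (pvH kr d) 1 + 1) else a) a = a ∨
    ∃ d ∈ L, pvCont c d ∧
      L.foldl (fun a d => if pvCont c d then max a (min (pvH kr d) 1 + 1) else a) a =
        min (pvH kr d) 1 + 1 := by
  induction L generalizing a with
  | nil => simp
  | cons d t ih =>
    simp only [List.foldl_cons]
    by_cases h : pvCont c d
    · rw [if_pos h]
      rcases ih (max a (min (pvH kr d) 1 + 1)) with heq | ⟨e, he, hc, heq⟩
      · rcases max_choice a (min (pvH kr d) 1 + 1) with hm | hm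
        · exact Or.inl (by rw [heq, hm])
        · exact Or.inr ⟨d, by simp, h, by rw [heq, hm]⟩
      · exact Or.inr ⟨e, by simp [he], hc, heq⟩
    · rw [if_neg h]
      rcases ih a with heq | ⟨e, he, hc, heq⟩
      · exact Or.inl heq
      · exact Or.inr ⟨e, by simp [he], hc, heq⟩

theorem pv_hfold (krogi : List (Int × Int × Int)) (c : Int × Int × Int)
    (L : List (Int × Int × Int))
    (hsub : ∀ d ∈ L, d ∈ krogi) (hall : ∀ d ∈ krogi, pvCont c d → d ∈ L) :
    L.foldl (fun a d => if pvCont c d then max a (min (pvH krogi d) 1 + 1) else a) 0 =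
      pvH krogi c := by
  by_cases hhas : pvHas krogi c = true
  · obtain ⟨d0, hd0, hcd0⟩ : ∃ d ∈ krogi, pvCont c d := by
      simpa [pvHas, List.any_eq_true] using hhas
    by_cases hX : krogi.any (fun d => decide (pvCont c d) && pvHas krogi d) = true
    · -- pvH c = 2
      obtain ⟨d1, hd1, hcd1, hhd1⟩ : ∃ d ∈ krogi, pvCont c d ∧ pvHas krogi d = true := by
        simpa [List.any_eq_true] using hX
      have h2 : min (pvH krogi d1) 1 + 1 = 2 := by
        have := (pvH_pos_iff krogi d1).mpr hhd1; omega
      have hge := (pv_maxfold_ge krogi c L 0).2 d1 (hall d1 hd1 hcd1) hcd1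
      rw [h2] at hge
      have hle : L.foldl (fun a d => if pvCont c d then max a (min (pvH krogi d) 1 + 1) else a) 0 ≤ 2 := by
        rcases pv_maxfold_cases krogi c L 0 with heq | ⟨e, _, _, heq⟩
        · omega
        · have := (pvH_nonneg krogi e).1; omega
      have : pvH krogi c = 2 := by unfold pvH; rw [if_pos hhas, if_pos hX]
      omega
    · -- pvH c = 1: every child has no child
      have hone : ∀ d ∈ L, pvCont c d → min (pvH krogi d) 1 + 1 = 1 := by
        intro d hd hcd
        have hdk := hsub d hd
        have : pvHas krogi d = false := by
          by_contra hb
          exact hX (List.any_eq_true.mpr ⟨d, hdk, by simp [hcd, eq_true_of_ne_false hb]⟩)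
        have h0 : pvH krogi d = 0 := by unfold pvH; rw [this]; simp
        rw [h0]; norm_num
      have hge := (pv_maxfold_ge krogi c L 0).2 d0 (hall d0 hd0 hcd0) hcd0
      rw [hone d0 (hall d0 hd0 hcd0) hcd0] at hge
      have : pvH krogi c = 1 := by unfold pvH; rw [if_pos hhas, if_neg (by simp_all)]
      rcases pv_maxfold_cases krogi c L 0 with heq | ⟨e, he, hce, heq⟩
      · omega
      · rw [hone e he hce] at heq; omega
  · -- pvH c = 0, no child at all
    have h0 : pvH krogi c = 0 := by unfold pvH; rw [eq_false_of_ne_true hhas]; simp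
    rcases pv_maxfold_cases krogi c L 0 with heq | ⟨e, he, hce, heq⟩
    · rw [heq, h0]
    · exact absurd (List.any_eq_true.mpr ⟨e, hsub e he, by simp [hce]⟩) hhas

theorem pv_inner_split (c : Int × Int × Int)
    (D : PySem.Dict (Int × Int × Int) Int) (L : List (Int × Int × Int))
    (a0 : Int) (s0 : PySem.Set (Int × Int × Int)) :
    L.foldl (fun (q : Int × PySem.Set (Int × Int × Int)) d =>
      if c.2.2 > d.2.2 ∧ (d.1 - c.1) ^ 2 + (d.2.1 - c.2.1) ^ 2 < c.2.2 ^ 2 then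
        (max q.1 (min (D.getD d 0) 1 + 1), q.2.add d)
      else q) (a0, s0) =
    (L.foldl (fun a d => if pvCont c d then max a (min (D.getD d 0) 1 + 1) else a) a0,
     L.foldl (fun s d => if pvCont c d then PySem.Set.add s d else s) s0) := by
  induction L generalizing a0 s0 with
  | nil => rfl
  | cons d t ih =>
    simp only [List.foldl_cons]
    by_cases h : pvCont c d
    · rw [if_pos h, if_pos h, if_pos h]; exact ih _ _
    · rw [if_neg h, if_neg h, if_neg h]; exact ih _ _

theorem pv_addfold_mem (c : Int × Int × Int) (L : List (Int × Int × Int))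
    (s : PySem.Set (Int × Int × Int)) (x : Int × Int × Int) :
    x ∈ L.foldl (fun s d => if pvCont c d then PySem.Set.add s d else s) s ↔
      x ∈ s ∨ (x ∈ L ∧ pvCont c x) := by
  induction L generalizing s with
  | nil => simp
  | cons d t ih =>
    simp only [List.foldl_cons]
    by_cases h : pvCont c d
    · rw [if_pos h, ih]
      simp only [PySem.Set.mem_add, List.mem_cons]
      constructor
      · rintro ((hx | rfl) | ⟨hl, hc⟩)
        · exact Or.inl hx
        · exact Or.inr ⟨Or.inl rfl, h⟩
        · exact Or.inr ⟨Or.inr hl, hc⟩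
      · rintro (hx | ⟨rfl | hl, hc⟩)
        · exact Or.inl (Or.inl hx)
        · exact Or.inl (Or.inr rfl)
        · exact Or.inr ⟨hl, hc⟩
    · rw [if_neg h, ih]
      simp only [List.mem_cons]
      constructor
      · rintro (hx | ⟨hl, hc⟩)
        · exact Or.inl hx
        · exact Or.inr ⟨Or.inr hl, hc⟩
      · rintro (hx | ⟨rfl | hl, hc⟩)
        · exact Or.inl hx
        · exact absurd hc h
        · exact Or.inr ⟨hl, hc⟩

theorem pvB_inv (krogi l p : List (Int × Int × Int))
    (hsort : PySem.List.sorted krogi (fun k => k.2.2) = p ++ l)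
    (st : PySem.Dict (Int × Int × Int) Int × PySem.Set (Int × Int × Int))
    (I1 : ∀ x, st.1.contains x = true ↔ x ∈ p)
    (I2 : ∀ x ∈ p, st.1.getD x 0 = pvH krogi x)
    (I3 : ∀ x, x ∈ st.2 ↔ x ∈ p ∧ ∃ e ∈ p, pvCont e x) :
    (∀ x, (l.foldl pvStep st).1.contains x = true ↔ x ∈ p ++ l) ∧
    (∀ x ∈ p ++ l, (l.foldl pvStep st).1.getD x 0 = pvH krogi x) ∧
    (∀ x, x ∈ (l.foldl pvStep st).2 ↔ x ∈ p ++ l ∧ ∃ e ∈ p ++ l, pvCont e x) := by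
  induction l generalizing p st with
  | nil =>
    simp only [List.foldl_nil, List.append_nil]
    exact ⟨I1, I2, I3⟩
  | cons c t ih =>
    -- sortedness facts
    have hpw : (p ++ c :: t).Pairwise (fun a b => a.2.2 ≤ b.2.2) := by
      have := PySem.List.sorted_pairwise (xs := krogi) (key := fun k => k.2.2)
      rwa [hsort] at this
    have hpc := List.pairwise_append.mp hpw
    have F1 : ∀ e ∈ p, e.2.2 ≤ c.2.2 := fun e he => hpc.2.2 e he c (List.mem_cons_self)
    have Fct : ∀ d ∈ t, c.2.2 ≤ d.2.2 := (List.pairwise_cons.mp hpc.2.1).1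
    have Fmem : ∀ d ∈ krogi, d ∈ p ++ c :: t := by
      intro d hd
      rw [← hsort]
      exact (PySem.List.mem_sorted _ _ _ _).mpr hd
    have Fmem' : ∀ d ∈ p ++ c :: t, d ∈ krogi := by
      intro d hd
      rw [← hsort] at hd
      exact (PySem.List.mem_sorted _ _ _ _).mp hd
    have F2 : ∀ d ∈ krogi, pvCont c d → d ∈ p := by
      intro d hd hcd
      rcases List.mem_append.mp (Fmem d hd) with hp | hct
      · exact hp
      · rcases List.mem_cons.mp hct with rfl | ht
        · exact absurd hcd.1 (lt_irrefl _)
        · exact absurd hcd.1 (not_lt.mpr (Fct d ht))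
    -- the step
    have hkeys : ∀ d, d ∈ st.1.keys ↔ d ∈ p := by
      intro d
      rw [← PySem.Dict.contains_iff_mem_keys]
      exact I1 d
    have hstep : pvStep st c =
        (st.1.insert c (pvH krogi c),
         st.1.keys.foldl (fun s d => if pvCont c d then PySem.Set.add s d else s) st.2) := by
      show (st.1.insert c _, _) = _
      rw [pv_inner_split]
      have hA : st.1.keys.foldl
          (fun a d => if pvCont c d then max a (min (st.1.getD d 0) 1 + 1) else a) 0 =
          pvH krogi c := by
        have hcongr : st.1.keys.foldl
            (fun a d => if pvCont c d then max a (min (st.1.getD d 0) 1 + 1) else a) 0 =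
            st.1.keys.foldl
            (fun a d => if pvCont c d then max a (min (pvH krogi d) 1 + 1) else a) 0 :=
          PySem.List.foldl_congr_mem _ _ _ _ (fun acc x hx => by
            rw [I2 x ((hkeys x).mp hx)])
        rw [hcongr]
        exact pv_hfold krogi c st.1.keys
          (fun d hd => Fmem' d (List.mem_append_left _ ((hkeys d).mp hd)))
          (fun d hd hcd => (hkeys d).mpr (F2 d hd hcd))
      rw [hA]
    -- new invariants for p ++ [c]
    have I1' : ∀ x, (pvStep st c).1.contains x = true ↔ x ∈ p ++ [c] := by
      intro x
      rw [hstep]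
      simp only [PySem.Dict.contains_insert, Bool.or_eq_true, beq_iff_eq, List.mem_append,
        List.mem_singleton, I1 x]
      tauto
    have I2' : ∀ x ∈ p ++ [c], (pvStep st c).1.getD x 0 = pvH krogi x := by
      intro x hx
      rw [hstep]
      simp only [PySem.Dict.getD_insert]
      split
      · next he => rw [he]
      · next he =>
        rcases List.mem_append.mp hx with hp | hc
        · exact I2 x hp
        · exact absurd (List.mem_singleton.mp hc) he
    have I3' : ∀ x, x ∈ (pvStep st c).2 ↔ x ∈ p ++ [c] ∧ ∃ e ∈ p ++ [c], pvCont e x := by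
      intro x
      rw [hstep]
      show x ∈ _ ↔ _
      rw [pv_addfold_mem, I3 x]
      simp only [List.mem_append, List.mem_singleton, hkeys x]
      constructor
      · rintro (⟨hx, e, he, hce⟩ | ⟨hx, hcx⟩)
        · exact ⟨Or.inl hx, e, Or.inl he, hce⟩
        · exact ⟨Or.inl hx, c, Or.inr rfl, hcx⟩
      · rintro ⟨hx, e, he, hce⟩
        rcases he with he | rfl
        · -- e ∈ p contains x, so x has smaller radius than every element radius ≥ … : x ∈ p
          have hxp : x ∈ p := by
            rcases hx with hx | rfl
            · exact hx
            · exact absurd hce.1 (not_lt.mpr (F1 e he))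
          exact Or.inl ⟨hxp, e, he, hce⟩
        · have hxp : x ∈ p := by
            rcases hx with hx | rfl
            · exact hx
            · exact absurd hce.1 (lt_irrefl _)
          exact Or.inr ⟨hxp, hce⟩
    have hsort' : PySem.List.sorted krogi (fun k => k.2.2) = (p ++ [c]) ++ t := by
      rw [hsort, List.append_assoc]; rfl
    have := ih (p ++ [c]) hsort' (pvStep st c) I1' I2' I3'
    simpa [List.append_assoc] using this


-- B's final filter condition agrees with A's, pointwise on krogi
theorem pv_cond_eq (krogi : List (Int × Int × Int)) (c : Int × Int × Int) (hc : c ∈ krogi)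
    (st : PySem.Dict (Int × Int × Int) Int × PySem.Set (Int × Int × Int))
    (hst : st = (PySem.List.sorted krogi (fun k => k.2.2)).foldl pvStep
      (PySem.Dict.empty, PySem.Set.empty)) :
    pvCondA krogi c = (!st.2.contains c && decide (st.1.getD c 0 ≠ 1)) := by
  obtain ⟨J1, J2, J3⟩ := pvB_inv krogi (PySem.List.sorted krogi (fun k => k.2.2)) []
    (by simp) (PySem.Dict.empty, PySem.Set.empty)
    (by simp [PySem.Dict.contains_empty])
    (by simp)
    (by simp [PySem.Set.empty])
  rw [← hst] at J1 J2 J3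
  simp only [List.nil_append] at J1 J2 J3
  have hcS : c ∈ PySem.List.sorted krogi (fun k => k.2.2) :=
    (PySem.List.mem_sorted _ _ _ _).mpr hc
  have hc2 : st.2.contains c = (vsebovanost krogi).2.contains c := by
    rw [Bool.eq_iff_iff, PySem.Set.contains_iff, PySem.Set.contains_iff, J3 c, pv_notranji]
    simp only [PySem.List.mem_sorted]
  have hgd : st.1.getD c 0 = pvH krogi c := J2 c hcS
  have hsecond : (decide ((vsebovanost krogi).1.getD c [] = []) ||
      ((vsebovanost krogi).1.getD c []).any (fun e => (vsebovanost krogi).1.contains e)) =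
      decide (pvH krogi c ≠ 1) := by
    rw [Bool.eq_iff_iff]
    simp only [Bool.or_eq_true, decide_eq_true_eq, List.any_eq_true]
    by_cases hhas : pvHas krogi c = true
    · obtain ⟨d0, hd0, hcd0⟩ : ∃ d ∈ krogi, pvCont c d := by
        simpa [pvHas, List.any_eq_true] using hhas
      have hne : (vsebovanost krogi).1.getD c [] ≠ [] :=
        (pv_vseb_getD_ne krogi c).mpr ⟨hc, d0, hd0, hcd0⟩
      by_cases hX : krogi.any (fun d => decide (pvCont c d) && pvHas krogi d) = true
      · have hH : pvH krogi c = 2 := by unfold pvH; rw [if_pos hhas, if_pos hX]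
        obtain ⟨d1, hd1, hcd1, hhd1⟩ : ∃ d ∈ krogi, pvCont c d ∧ pvHas krogi d = true := by
          simpa [List.any_eq_true] using hX
        obtain ⟨e1, he1, he1c⟩ : ∃ e ∈ krogi, pvCont d1 e := by
          simpa [pvHas, List.any_eq_true] using hhd1
        constructor
        · intro _; omega
        · intro _
          refine Or.inr ⟨d1, (pv_vseb_getD krogi c d1).mpr ⟨hc, hd1, hcd1⟩, ?_⟩
          exact (pv_vseb_contains krogi d1).mpr ⟨hd1, e1, he1, he1c⟩
      · have hH : pvH krogi c = 1 := by
          unfold pvH; rw [if_pos hhas, if_neg (by simp_all)]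
        constructor
        · rintro (h0 | ⟨e, hel, hec⟩)
          · exact absurd h0 hne
          · obtain ⟨-, hek, hce⟩ := (pv_vseb_getD krogi c e).mp hel
            obtain ⟨-, f, hf, hef⟩ := (pv_vseb_contains krogi e).mp hec
            have hpe : pvHas krogi e = true :=
              List.any_eq_true.mpr ⟨f, hf, by simp [hef]⟩
            exact absurd (List.any_eq_true.mpr ⟨e, hek, by simp [hce, hpe]⟩) hX
        · intro h1; omega
    · have hH : pvH krogi c = 0 := by unfold pvH; rw [eq_false_of_ne_true hhas]; simp
      have hnil : (vsebovanost krogi).1.getD c [] = [] := by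
        by_contra hb
        obtain ⟨-, d, hd, hcd⟩ := (pv_vseb_getD_ne krogi c).mp hb
        exact hhas (List.any_eq_true.mpr ⟨d, hd, by simp [hcd]⟩)
      constructor
      · intro _; omega
      · intro _; exact Or.inl hnil
  simp only [pvCondA, hc2, hgd, hsecond]

-- ===== VERDICT (by name: the statement is the Claim_ definition above) =====
theorem sumljivi_spec : Claim_equal_sumljivi := by
  intro krogi _
  show sumljivi krogi = sumljivi_alt krogi
  have hA : sumljivi krogi =
      krogi.foldl (fun s c => if pvCondA krogi c then PySem.Set.add s (c.1, c.2.1) else s)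
        PySem.Set.empty :=
    pv_loop_proj krogi krogi PySem.Set.empty (vsebovanost krogi).1 (fun _ => rfl) (fun _ _ => rfl)
  set st := (PySem.List.sorted krogi (fun k => k.2.2)).foldl pvStep
    (PySem.Dict.empty, PySem.Set.empty) with hst
  have h1 : sumljivi_alt krogi =
      ((krogi.filter (fun c => !st.2.contains c && decide (st.1.getD c 0 ≠ 1))).map
        (fun c => (c.1, c.2.1))).foldl PySem.Set.add PySem.Set.empty :=
    PySem.Set.ofList_eq_foldl _
  have hB : sumljivi_alt krogi =
      krogi.foldl (fun s c =>
        if !st.2.contains c && decide (st.1.getD c 0 ≠ 1) then PySem.Set.add s (c.1, c.2.1)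
        else s) PySem.Set.empty := by
    rw [h1]
    exact pv_ofList_filter_map _ _ _ _
  rw [hA, hB]
  exact PySem.List.foldl_congr_mem _ _ _ _ (fun acc x hx => by
    rw [pv_cond_eq krogi x hx st hst])
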